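-- pv_equiv track=rewrite | github.com/microsoft/AirSim | ros2/install/_local_setup_util_sh.py | reduce_cycle_set
-- ===== SOURCE A (Python) =====
-- def reduce_cycle_set(packages):
--     """
--     Reduce the set of packages to the ones part of the circular dependency.
--
--     :param dict packages: A mapping from package name to the set of runtime
--       dependencies which is modified in place
--     """
--     last_depended = None
--     while len(packages) > 0:
--         # get all remaining dependencies
--         depended = set()
--         for pkg_name, dependencies in packages.items():
--             depended = depended.union(dependencies)
--         # remove all packages which are not dependent on
--         for name in list(packages.keys()):
--             if name not in depended:
--                 del packages[name]
--         if last_depended: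
--             # if remaining packages haven't changed return them
--             if last_depended == depended:
--                 return packages.keys()
--         # otherwise reduce again
--         last_depended = depended
-- ===== SOURCE B (Python) =====
-- def reduce_cycle_set(packages):
--     """
--     Reduce the set of packages to the ones part of the circular dependency.
--
--     Kahn-style peeling: count, for every name, how many remaining packages
--     depend on it; repeatedly remove packages nobody depends on, decrementing
--     the counts of their dependencies once, instead of rescanning all
--     dependency sets on every round.
--
--     :param dict packages: A mapping from package name to the set of runtime
--       dependencies which is modified in place
--     """
--     cnt = {}
--     for dependencies in packages.values():
--         for dep in dependencies:
--             cnt[dep] = cnt.get(dep, 0) + 1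
--     queue = [name for name in packages if cnt.get(name, 0) == 0]
--     removed = set()
--     while queue:
--         name = queue.pop()
--         removed.add(name)
--         for dep in packages[name]:
--             cnt[dep] -= 1
--             if cnt[dep] == 0 and dep in packages and dep not in removed:
--                 queue.append(dep)
--     for name in removed:
--         del packages[name]
--     if packages:
--         return packages.keys()
--     return None
-- ===== Notes on version B (the rewrite author's own statement) =====
-- stated objective: faster
-- what changed: A repeatedly rescans every remaining dependency set to rebuild the 'depended' union until it stabilises; B computes a reference count per name once and does Kahn-style peeling (pop a zero-count package, decrement its dependencies' counts, enqueue names whose count hits zero), touching each edge once.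
import Mathlib
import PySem

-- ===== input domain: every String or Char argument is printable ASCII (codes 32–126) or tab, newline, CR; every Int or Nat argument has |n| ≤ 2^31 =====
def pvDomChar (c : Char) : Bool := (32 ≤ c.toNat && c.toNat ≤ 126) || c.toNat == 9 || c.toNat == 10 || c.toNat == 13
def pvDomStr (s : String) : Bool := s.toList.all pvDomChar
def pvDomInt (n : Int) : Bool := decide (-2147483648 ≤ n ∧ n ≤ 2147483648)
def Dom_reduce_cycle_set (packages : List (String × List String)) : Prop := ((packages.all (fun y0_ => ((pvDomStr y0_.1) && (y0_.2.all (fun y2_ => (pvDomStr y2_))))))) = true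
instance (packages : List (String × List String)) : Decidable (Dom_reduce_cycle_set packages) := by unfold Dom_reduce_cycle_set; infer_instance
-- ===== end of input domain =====

-- B replaces A's rescan-all-dependency-sets-per-round loop by Kahn-style peeling with
-- dependency counts (objective: faster). Both A and B delete the same entries from the
-- argument dict in place; the theorems below are about the return value.

-- ===== PORT A =====
-- depended = set(); for pkg_name, dependencies in packages.items(): depended = depended.union(dependencies)
def pvDepended (pkgs : List (String × List String)) : PySem.Set String :=
  pkgs.foldl (fun dep pr => PySem.Set.union dep pr.2) PySem.Set.empty

-- the 'while len(packages) > 0' loop; fuel (length + 2) is proven sufficient below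
def pvLoopA : Nat → Option (PySem.Set String) → List (String × List String) → Option (List String)
  | 0, _, _ => none
  | fuel+1, last, pkgs =>
    if pkgs.isEmpty then none
    else
      let depended := pvDepended pkgs
      -- for name in list(packages.keys()): if name not in depended: del packages[name]
      let pkgs' := pkgs.filter (fun pr => PySem.Set.contains depended pr.1)
      match last with
      | some d =>
          if !d.isEmpty && PySem.Set.equal d depended then some (pkgs'.map Prod.fst)
          else pvLoopA fuel (some depended) pkgs'
      | none => pvLoopA fuel (some depended) pkgs'

def reduce_cycle_set (packages : List (String × List String)) : Option (List String) :=
  pvLoopA (packages.length + 2) none packages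

-- ===== PORT B =====
-- body of 'for dep in packages[name]': decrement cnt[dep], enqueue newly unreferenced packages
def pvStepB (packages : List (String × List String)) (removed : PySem.Set String) :
    PySem.Dict String Int × List String → String → PySem.Dict String Int × List String :=
  fun cq dep =>
    let c := cq.1.insert dep (cq.1.getD dep 0 - 1)
    if c.getD dep 0 == 0 && packages.any (fun pr => pr.1 == dep) && !(PySem.Set.contains removed dep)
    then (c, cq.2 ++ [dep]) else (c, cq.2)

-- the 'while queue' loop; fuel (length + 1) is proven sufficient below
def pvKahnB (packages : List (String × List String)) :
    Nat → PySem.Dict String Int → List String → PySem.Set String → PySem.Set String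
  | 0, _, _, removed => removed
  | fuel+1, cnt, queue, removed =>
    match PySem.List.pop? queue (-1) with
    | none => removed
    | some (name, queue') =>
      let removed' := PySem.Set.add removed name
      let deps := PySem.Set.ofList ((packages.lookup name).getD [])
      let cq := deps.foldl (pvStepB packages removed') (cnt, queue')
      pvKahnB packages fuel cq.1 cq.2 removed'

-- cnt[dep] = cnt.get(dep, 0) + 1 over every dependency set
def pvCnt0 (packages : List (String × List String)) : PySem.Dict String Int :=
  packages.foldl (fun c pr =>
    (PySem.Set.ofList pr.2).foldl (fun c dep => c.insert dep (c.getD dep 0 + 1)) c)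
    PySem.Dict.empty

-- queue = [name for name in packages if cnt.get(name, 0) == 0]
def pvQueue0 (packages : List (String × List String)) : List String :=
  packages.filterMap (fun pr => if (pvCnt0 packages).getD pr.1 0 == 0 then some pr.1 else none)

def reduce_cycle_set_alt (packages : List (String × List String)) : Option (List String) :=
  let removed := pvKahnB packages (packages.length + 1) (pvCnt0 packages) (pvQueue0 packages)
    PySem.Set.empty
  let pkgs2 := packages.filter (fun pr => !(PySem.Set.contains removed pr.1))
  if pkgs2.isEmpty then none else some (pkgs2.map Prod.fst)

-- ===== PRECONDITION & SPEC =====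
-- Pre_ excludes association lists with duplicate package names: they do not represent a
-- Python dict (A's parameter), and which of the duplicate rows wins is a first-vs-last artefact.
def Pre_reduce_cycle_set (packages : List (String × List String)) : Prop :=
  (packages.map Prod.fst).Nodup
instance (packages : List (String × List String)) : Decidable (Pre_reduce_cycle_set packages) := by
  unfold Pre_reduce_cycle_set; infer_instance

def pvWitness_reduce_cycle_set : (List (String × List String)) := [("a", ["a"]), ("b", ["a"])]

def Spec_reduce_cycle_set (packages : List (String × List String)) (out : Option (List String)) : Prop := out = reduce_cycle_set_alt packages
instance (packages : List (String × List String)) (out : Option (List String)) : Decidable (Spec_reduce_cycle_set packages out) := by unfold Spec_reduce_cycle_set; infer_instance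

-- ===== CLAIM (what is proved, stated in full; the proofs are below) =====
def Claim_equal_reduce_cycle_set : Prop := ∀ (packages : List (String × List String)), Dom_reduce_cycle_set packages → Pre_reduce_cycle_set packages → Spec_reduce_cycle_set packages (reduce_cycle_set packages)

-- ===== LEMMAS AND PROOFS =====

def pvKeys (P : List (String × List String)) : List String := P.map Prod.fst

-- C is a set of packages each of which is depended on by some member of C
def pvClosed (P : List (String × List String)) (C : String → Prop) : Prop :=
  ∀ p, C p → p ∈ pvKeys P ∧ ∃ pr ∈ P, C pr.1 ∧ p ∈ pr.2

def pvSurv (P : List (String × List String)) (p : String) : Prop :=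
  ∃ C, pvClosed P C ∧ C p

-- number of not-yet-removed packages whose dependency set contains d
def pvCount (P : List (String × List String)) (removed : PySem.Set String) (d : String) : Nat :=
  (P.filter (fun pr => !(PySem.Set.contains removed pr.1))).countP (fun pr => pr.2.contains d)

lemma pv_mem_depended_aux (pkgs : List (String × List String)) (p : String) :
    ∀ (s : PySem.Set String), p ∈ pkgs.foldl (fun dep pr => PySem.Set.union dep pr.2) s ↔
      p ∈ s ∨ ∃ pr ∈ pkgs, p ∈ pr.2 := by
  induction pkgs with
  | nil => simp
  | cons hd tl ih =>
    intro s
    simp only [List.foldl_cons, ih, PySem.Set.mem_union, List.mem_cons]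
    constructor
    · rintro ((h | h) | h)
      · exact Or.inl h
      · exact Or.inr ⟨hd, Or.inl rfl, h⟩
      · obtain ⟨pr, hm, hp⟩ := h; exact Or.inr ⟨pr, Or.inr hm, hp⟩
    · rintro (h | ⟨pr, (rfl | hm), hp⟩)
      · exact Or.inl (Or.inl h)
      · exact Or.inl (Or.inr hp)
      · exact Or.inr ⟨pr, hm, hp⟩

lemma pv_mem_depended (pkgs : List (String × List String)) (p : String) :
    p ∈ pvDepended pkgs ↔ ∃ pr ∈ pkgs, p ∈ pr.2 := by
  unfold pvDepended
  rw [pv_mem_depended_aux]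
  simp [PySem.Set.empty]

lemma pv_filter_sublist_eq (P pkgs : List (String × List String))
    (hK : (pvKeys P).Nodup) (hsub : pkgs.Sublist P) :
    P.filter (fun pr => decide (pr.1 ∈ pvKeys pkgs)) = pkgs := by
  induction hsub with
  | slnil => simp
  | @cons l₁ l₂ pr hsub ih =>
    simp only [pvKeys, List.map_cons, List.nodup_cons] at hK
    have hnot : pr.1 ∉ pvKeys l₁ := fun h =>
      hK.1 (List.Sublist.subset (List.Sublist.map Prod.fst hsub) h)
    simp only [List.filter_cons, decide_eq_true_eq, hnot, ite_false]
    exact ih hK.2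
  | @cons₂ l₁ l₂ pr hsub ih =>
    simp only [pvKeys, List.map_cons, List.nodup_cons] at hK
    simp only [List.filter_cons]
    have hhd : pr.1 ∈ pvKeys (pr :: l₁) := by simp [pvKeys]
    rw [if_pos (by simpa using hhd)]
    congr 1
    have hcongr : ∀ pr' ∈ l₂, decide (pr'.1 ∈ pvKeys (pr :: l₁)) = decide (pr'.1 ∈ pvKeys l₁) := by
      intro pr' hpr'
      have hne : pr'.1 ≠ pr.1 := by
        intro h; exact hK.1 (h ▸ List.mem_map_of_mem hpr')
      simp [pvKeys, hne]
    rw [List.filter_congr hcongr]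
    exact ih hK.2

lemma pv_mem_of_sublist_key (P pkgs : List (String × List String))
    (hK : (pvKeys P).Nodup) (hsub : pkgs.Sublist P)
    {pr : String × List String} (hpr : pr ∈ P) (hk : pr.1 ∈ pvKeys pkgs) : pr ∈ pkgs := by
  rw [← pv_filter_sublist_eq P pkgs hK hsub]
  simp [List.mem_filter, hpr, hk]

lemma pv_count_pos_iff (P : List (String × List String)) (removed : PySem.Set String) (d : String) :
    0 < pvCount P removed d ↔ ∃ pr ∈ P, pr.1 ∉ removed ∧ d ∈ pr.2 := by
  unfold pvCount
  rw [List.countP_pos_iff]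
  constructor
  · rintro ⟨pr, hm, hp⟩
    rw [List.mem_filter] at hm
    refine ⟨pr, hm.1, ?_, ?_⟩
    · simpa [PySem.Set.contains_iff] using hm.2
    · simpa using hp
  · rintro ⟨pr, hm, hr, hd⟩
    refine ⟨pr, List.mem_filter.mpr ⟨hm, by simpa [PySem.Set.contains_iff] using hr⟩, by simpa using hd⟩

lemma pv_contains_add_of_ne (s : PySem.Set String) {x y : String} (h : x ≠ y) :
    PySem.Set.contains (PySem.Set.add s y) x = PySem.Set.contains s x := by
  rw [Bool.eq_iff_iff, PySem.Set.contains_iff, PySem.Set.contains_iff, PySem.Set.mem_add]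
  exact ⟨fun hm => hm.resolve_right h, Or.inl⟩

lemma pv_count_congr (Q : List (String × List String)) {removed removed' : PySem.Set String}
    (h : ∀ pr ∈ Q, PySem.Set.contains removed pr.1 = PySem.Set.contains removed' pr.1)
    (d : String) : pvCount Q removed d = pvCount Q removed' d := by
  unfold pvCount
  rw [List.filter_congr (fun pr hpr => by rw [h pr hpr])]

lemma pv_count_split (P : List (String × List String)) (hK : (pvKeys P).Nodup)
    {name : String} {v : List String} (hmem : (name, v) ∈ P)
    {removed : PySem.Set String} (hnr : name ∉ removed) (d : String) :
    pvCount P removed d = pvCount P (PySem.Set.add removed name) d + (if d ∈ v then 1 else 0) := by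
  induction P with
  | nil => simp at hmem
  | cons pr P' ih =>
    simp only [pvKeys, List.map_cons, List.nodup_cons] at hK
    rcases List.mem_cons.mp hmem with heq | htl
    · subst heq
      have hcongr : pvCount P' removed d = pvCount P' (PySem.Set.add removed name) d := by
        refine pv_count_congr P' (fun pr' hpr' => ?_) d
        refine (pv_contains_add_of_ne removed ?_).symm
        intro h
        apply hK.1
        show name ∈ List.map Prod.fst P'
        rw [← h]
        exact List.mem_map_of_mem hpr'
      have h1 : (!PySem.Set.contains removed name) = true := by
        simp [hnr]
      have h2 : (!PySem.Set.contains (PySem.Set.add removed name) name) = false := by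
        simp [PySem.Set.mem_add]
      unfold pvCount
      simp only [List.filter_cons, h1, h2, Bool.false_eq_true, if_true, if_false, List.countP_cons]
      unfold pvCount at hcongr
      have hcd : (v.contains d = true) ↔ d ∈ v := by simp
      by_cases hdv : d ∈ v
      · simp only [hcd.mpr hdv, if_pos hdv, if_true]
        omega
      · have : v.contains d = false := by simpa using hdv
        simp only [this, if_neg hdv, Bool.false_eq_true, if_false]
        omega
    · have hne : pr.1 ≠ name := fun h => by
        have : name ∈ List.map Prod.fst P' := List.mem_map_of_mem htl
        exact hK.1 (h ▸ this)
      have hcc : PySem.Set.contains (PySem.Set.add removed name) pr.1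
          = PySem.Set.contains removed pr.1 := pv_contains_add_of_ne removed hne
      unfold pvCount
      simp only [List.filter_cons, hcc]
      by_cases hpass : (!PySem.Set.contains removed pr.1) = true
      · simp only [hpass, if_true, List.countP_cons]
        have := ih hK.2 htl
        unfold pvCount at this
        omega
      · have hfalse : (!PySem.Set.contains removed pr.1) = false := by simpa using hpass
        simp only [hfalse, Bool.false_eq_true, if_false]
        have := ih hK.2 htl
        unfold pvCount at this
        exact this

lemma pv_lookup_mem (P : List (String × List String)) {name : String}
    (h : name ∈ pvKeys P) : ∃ v, P.lookup name = some v ∧ (name, v) ∈ P := by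
  induction P with
  | nil => simp [pvKeys] at h
  | cons hd tl ih =>
    by_cases he : name = hd.1
    · exact ⟨hd.2, by simp [List.lookup, he.symm], by simp [he]⟩
    · simp only [pvKeys, List.map_cons, List.mem_cons] at h
      obtain ⟨v, h1, h2⟩ := ih (h.resolve_left he)
      refine ⟨v, ?_, List.mem_cons_of_mem _ h2⟩
      have : (name == hd.1) = false := by simpa using he
      simp [List.lookup, this, h1]

lemma pv_cnt0_getD (P : List (String × List String)) (d : String) :
    (P.foldl (fun c pr =>
      (PySem.Set.ofList pr.2).foldl (fun c dep => c.insert dep (c.getD dep 0 + 1)) c)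
      PySem.Dict.empty).getD d 0 = ((pvCount P PySem.Set.empty d : Nat) : Int) := by
  have haux : ∀ (Q : List (String × List String)) (c : PySem.Dict String Int),
      (Q.foldl (fun c pr =>
        (PySem.Set.ofList pr.2).foldl (fun c dep => c.insert dep (c.getD dep 0 + 1)) c) c).getD d 0
      = c.getD d 0 + ((Q.countP (fun pr => pr.2.contains d) : Nat) : Int) := by
    intro Q
    induction Q with
    | nil => simp
    | cons pr Q' ih =>
      intro c
      simp only [List.foldl_cons, ih, PySem.Dict.getD_foldl_insert_add_one, List.countP_cons]
      by_cases hdv : d ∈ pr.2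
      · have h1 : (PySem.Set.ofList pr.2).count d = 1 :=
          List.count_eq_one_of_mem (PySem.Set.nodup_ofList pr.2)
            ((PySem.Set.mem_ofList pr.2 d).mpr hdv)
        have h2 : pr.2.contains d = true := by simpa using hdv
        simp only [h1, h2, if_true]
        push_cast
        ring
      · have h1 : (PySem.Set.ofList pr.2).count d = 0 :=
          List.count_eq_zero.mpr (fun h => hdv ((PySem.Set.mem_ofList pr.2 d).mp h))
        have h2 : pr.2.contains d = false := by simpa using hdv
        simp only [h1, h2, Bool.false_eq_true, if_false]
        push_cast
        ring
  rw [haux]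
  have hfilter : P.filter (fun pr => !(PySem.Set.contains PySem.Set.empty pr.1)) = P := by
    apply List.filter_eq_self.mpr
    intro pr _
    simp [PySem.Set.empty, PySem.Set.contains]
  unfold pvCount
  rw [hfilter]
  simp

lemma pv_stepB_fold (packages : List (String × List String)) (removed' : PySem.Set String)
    (ds : List String) (hnd : ds.Nodup) (c : PySem.Dict String Int) (q : List String) :
    (∀ x, (ds.foldl (pvStepB packages removed') (c, q)).1.getD x 0
        = c.getD x 0 - (if x ∈ ds then 1 else 0)) ∧
    (ds.foldl (pvStepB packages removed') (c, q)).2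
      = q ++ ds.filter (fun d => (c.getD d 0 == 1) && packages.any (fun pr => pr.1 == d)
            && !(PySem.Set.contains removed' d)) := by
  induction ds generalizing c q with
  | nil => simp
  | cons d ds' ih =>
    simp only [List.nodup_cons] at hnd
    have hd : d ∉ ds' := hnd.1
    -- effect of the first step
    have hstep : pvStepB packages removed' (c, q) d =
        (c.insert d (c.getD d 0 - 1),
         if (c.getD d 0 == 1) && packages.any (fun pr => pr.1 == d)
            && !(PySem.Set.contains removed' d) then q ++ [d] else q) := by
      unfold pvStepB
      simp only [PySem.Dict.getD_insert_self]
      have : ((c.getD d 0 - 1) == 0) = (c.getD d 0 == 1) := by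
        rw [Bool.eq_iff_iff, beq_iff_eq, beq_iff_eq]
        omega
      rw [this]
      split <;> rfl
    obtain ⟨ih1, ih2⟩ := ih hnd.2 (c.insert d (c.getD d 0 - 1))
      (if (c.getD d 0 == 1) && packages.any (fun pr => pr.1 == d)
          && !(PySem.Set.contains removed' d) then q ++ [d] else q)
    constructor
    · intro x
      simp only [List.foldl_cons, hstep, ih1, PySem.Dict.getD_insert, List.mem_cons]
      by_cases hx : x = d
      · subst hx
        simp [hd]
      · simp [hx]
    · simp only [List.foldl_cons, hstep, ih2, List.filter_cons]
      have hcongr : ∀ e ∈ ds',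
          ((((c.insert d (c.getD d 0 - 1)).getD e 0 == 1) && packages.any (fun pr => pr.1 == e))
            && !(PySem.Set.contains removed' e))
          = (((c.getD e 0 == 1) && packages.any (fun pr => pr.1 == e))
            && !(PySem.Set.contains removed' e)) := by
        intro e he
        have hne : e ≠ d := fun h => hd (h ▸ he)
        rw [PySem.Dict.getD_insert, if_neg hne]
      rw [List.filter_congr hcongr]
      split <;> simp

lemma pv_kahn_main (P : List (String × List String)) (hK : (pvKeys P).Nodup) :
    ∀ (fuel : Nat) (cnt : PySem.Dict String Int) (queue : List String) (removed : PySem.Set String),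
    removed.Nodup →
    (∀ x ∈ removed, x ∈ pvKeys P) →
    queue.Nodup →
    (∀ q ∈ queue, q ∈ pvKeys P ∧ q ∉ removed) →
    (∀ d, cnt.getD d 0 = ((pvCount P removed d : Nat) : Int)) →
    (∀ q ∈ queue, cnt.getD q 0 = 0) →
    (∀ k ∈ pvKeys P, k ∉ removed → cnt.getD k 0 = 0 → k ∈ queue) →
    ((pvKeys P).filter (fun k => !(PySem.Set.contains removed k))).length < fuel →
    (∀ x ∈ removed, x ∈ pvKahnB P fuel cnt queue removed) ∧
    (∀ k ∈ pvKeys P, k ∉ pvKahnB P fuel cnt queue removed →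
        ∃ pr ∈ P, pr.1 ∉ pvKahnB P fuel cnt queue removed ∧ k ∈ pr.2) ∧
    (∀ C, pvClosed P C → (∀ p, C p → p ∉ removed) →
        ∀ p, C p → p ∉ pvKahnB P fuel cnt queue removed) := by
  intro fuel
  induction fuel with
  | zero => intro cnt queue removed _ _ _ _ _ _ _ hlt; omega
  | succ fuel ih =>
    intro cnt queue removed hrn hrk hqn hqm hcnt hq0 hcomp hlt
    rcases List.eq_nil_or_concat queue with hq | ⟨queue', name, heq⟩
    · subst hq
      have hres : pvKahnB P (fuel+1) cnt [] removed = removed := by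
        simp [pvKahnB, PySem.List.pop?]
      rw [hres]
      refine ⟨fun x hx => hx, ?_, fun C _ hdis p hp => hdis p hp⟩
      intro k hk hkr
      have h0 : cnt.getD k 0 ≠ 0 := fun h => by simpa using hcomp k hk hkr h
      have hpos : 0 < pvCount P removed k := by
        have := hcnt k; omega
      exact (pv_count_pos_iff P removed k).mp hpos
    · rw [List.concat_eq_append] at heq
      subst heq
      have hname : name ∈ queue' ++ [name] := by simp
      obtain ⟨hnk, hnr⟩ := hqm name hname
      have hn0 : cnt.getD name 0 = 0 := hq0 name hname
      have hpc0 : pvCount P removed name = 0 := by have := hcnt name; omega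
      obtain ⟨v, hlk, hmemv⟩ := pv_lookup_mem P hnk
      have hqsplit := List.nodup_append.mp hqn
      have hq'nd : queue'.Nodup := hqsplit.1
      have hnq' : name ∉ queue' := fun h => hqsplit.2.2 name h name (by simp) rfl
      set removed' := PySem.Set.add removed name with hremoved'
      have hmemr' : ∀ x, x ∈ removed' ↔ x ∈ removed ∨ x = name := fun x =>
        PySem.Set.mem_add removed name x
      have hunfold : pvKahnB P (fuel+1) cnt (queue' ++ [name]) removed =
          pvKahnB P fuel
            ((PySem.Set.ofList v).foldl (pvStepB P removed') (cnt, queue')).1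
            ((PySem.Set.ofList v).foldl (pvStepB P removed') (cnt, queue')).2
            removed' := by
        simp only [pvKahnB, PySem.List.pop?_last, hlk, Option.getD_some]
        rfl
      obtain ⟨hf1, hf2⟩ := pv_stepB_fold P removed' (PySem.Set.ofList v)
        (PySem.Set.nodup_ofList v) cnt queue'
      set cnt' := ((PySem.Set.ofList v).foldl (pvStepB P removed') (cnt, queue')).1 with hc'
      set queue'' := ((PySem.Set.ofList v).foldl (pvStepB P removed') (cnt, queue')).2 with hq''
      set newq := (PySem.Set.ofList v).filter
        (fun d => ((cnt.getD d 0 == 1) && P.any (fun pr => pr.1 == d))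
          && !(PySem.Set.contains removed' d)) with hnewq
      have hqeq : queue'' = queue' ++ newq := hf2
      have hsplit : ∀ x, pvCount P removed x = pvCount P removed' x + (if x ∈ v then 1 else 0) :=
        fun x => pv_count_split P hK hmemv hnr x
      have hcnt' : ∀ x, cnt'.getD x 0 = ((pvCount P removed' x : Nat) : Int) := by
        intro x
        rw [hf1 x]
        have h1 := hcnt x
        have h2 := hsplit x
        have hm : x ∈ PySem.Set.ofList v ↔ x ∈ v := PySem.Set.mem_ofList v x
        by_cases hx : x ∈ v
        · rw [if_pos (hm.mpr hx)]
          rw [if_pos hx] at h2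
          omega
        · rw [if_neg (fun h => hx (hm.mp h))]
          rw [if_neg hx] at h2
          omega
      have hmem_newq : ∀ e, e ∈ newq ↔
          e ∈ v ∧ cnt.getD e 0 = 1 ∧ e ∈ pvKeys P ∧ e ∉ removed' := by
        intro e
        rw [hnewq, List.mem_filter, PySem.Set.mem_ofList]
        constructor
        · rintro ⟨hev, hpred⟩
          simp only [Bool.and_eq_true, beq_iff_eq, List.any_eq_true, Bool.not_eq_true'] at hpred
          obtain ⟨⟨h1, pr, hpr, h2⟩, h3⟩ := hpred
          refine ⟨hev, h1, ?_, ?_⟩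
          · unfold pvKeys
            rw [← h2]
            exact List.mem_map_of_mem hpr
          · simpa [PySem.Set.contains_iff] using h3
        · rintro ⟨hev, h1, h2, h3⟩
          refine ⟨hev, ?_⟩
          simp only [Bool.and_eq_true, beq_iff_eq, List.any_eq_true, Bool.not_eq_true']
          obtain ⟨w, hw⟩ : ∃ w, (e, w) ∈ P := by simpa [pvKeys] using h2
          refine ⟨⟨h1, (e, w), hw, rfl⟩, ?_⟩
          have : ¬ (PySem.Set.contains removed' e = true) := by
            rw [PySem.Set.contains_iff]; exact h3
          simpa using this
      rw [hunfold]
      -- establish the invariants for the recursive call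
      have hinv_rn : removed'.Nodup := PySem.Set.nodup_add removed name hrn
      have hinv_rk : ∀ x ∈ removed', x ∈ pvKeys P := by
        intro x hx
        rcases (hmemr' x).mp hx with h | rfl
        · exact hrk x h
        · exact hnk
      have hnewq_nd : newq.Nodup := List.Nodup.filter _ (PySem.Set.nodup_ofList v)
      have hdisj : ∀ e ∈ newq, e ∉ queue' := by
        intro e he heq'
        have h1 := (hmem_newq e).mp he
        have h2 := hq0 e (List.mem_append_left _ heq')
        omega
      have hinv_qn : queue''.Nodup := by
        rw [hqeq, List.nodup_append]
        exact ⟨hq'nd, hnewq_nd, fun a ha b hb hab => hdisj b hb (hab ▸ ha)⟩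
      have hinv_qm : ∀ q ∈ queue'', q ∈ pvKeys P ∧ q ∉ removed' := by
        intro q hq
        rw [hqeq, List.mem_append] at hq
        rcases hq with hq | hq
        · obtain ⟨h1, h2⟩ := hqm q (List.mem_append_left _ hq)
          refine ⟨h1, fun h => ?_⟩
          rcases (hmemr' q).mp h with h | rfl
          · exact h2 h
          · exact hnq' hq
        · have := (hmem_newq q).mp hq
          exact ⟨this.2.2.1, this.2.2.2⟩
      have hinv_q0 : ∀ q ∈ queue'', cnt'.getD q 0 = 0 := by
        intro q hq
        rw [hqeq, List.mem_append] at hq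
        rw [hcnt' q]
        rcases hq with hq | hq
        · have h2 := hq0 q (List.mem_append_left _ hq)
          have h1 := hcnt q
          have h3 := hsplit q
          split_ifs at h3 <;> omega
        · obtain ⟨hv, h1, _, _⟩ := (hmem_newq q).mp hq
          have h2 := hcnt q
          have h3 := hsplit q
          rw [if_pos hv] at h3
          omega
      have hinv_comp : ∀ k ∈ pvKeys P, k ∉ removed' → cnt'.getD k 0 = 0 → k ∈ queue'' := by
        intro k hk hkr hk0
        rw [hcnt' k] at hk0
        have h2 := hcnt k
        have h3 := hsplit k
        by_cases hkv : k ∈ v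
        · rw [if_pos hkv] at h3
          have : cnt.getD k 0 = 1 := by omega
          rw [hqeq, List.mem_append]
          exact Or.inr ((hmem_newq k).mpr ⟨hkv, this, hk, hkr⟩)
        · rw [if_neg hkv] at h3
          have hc0 : cnt.getD k 0 = 0 := by omega
          have hkrem : k ∉ removed := fun h => hkr ((hmemr' k).mpr (Or.inl h))
          have := hcomp k hk hkrem hc0
          rw [List.mem_append] at this
          rcases this with h | h
          · rw [hqeq, List.mem_append]; exact Or.inl h
          · have : k = name := by simpa using h
            exact absurd ((hmemr' k).mpr (Or.inr this)) hkr
      have hinv_lt : ((pvKeys P).filter (fun k => !(PySem.Set.contains removed' k))).length < fuel := by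
        have hsubf : (pvKeys P).filter (fun k => !(PySem.Set.contains removed' k))
            = ((pvKeys P).filter (fun k => !(PySem.Set.contains removed k))).filter
                (fun k => !(k == name)) := by
          rw [List.filter_filter]
          apply List.filter_congr
          intro k _
          rw [Bool.eq_iff_iff]
          simp only [Bool.and_eq_true, Bool.not_eq_true', beq_eq_false_iff_ne]
          rw [← Bool.not_eq_true, ← Bool.not_eq_true, PySem.Set.contains_iff, PySem.Set.contains_iff]
          rw [hmemr' k]
          constructor
          · intro h; exact ⟨fun he => h (Or.inr he), fun he => h (Or.inl he)⟩
          · rintro ⟨h1, h2⟩ (h | h)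
            · exact h2 h
            · exact h1 h
        rw [hsubf]
        have hmemf : name ∈ (pvKeys P).filter (fun k => !(PySem.Set.contains removed k)) := by
          rw [List.mem_filter]
          refine ⟨hnk, ?_⟩
          have : ¬ (PySem.Set.contains removed name = true) := by
            rw [PySem.Set.contains_iff]; exact hnr
          simpa using this
        have : (((pvKeys P).filter (fun k => !(PySem.Set.contains removed k))).filter
            (fun k => !(k == name))).length
            < ((pvKeys P).filter (fun k => !(PySem.Set.contains removed k))).length := by
          apply List.length_filter_lt_length_iff_exists.mpr
          exact ⟨name, hmemf, by simp⟩
        omega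
      obtain ⟨IH1, IH2, IH3⟩ := ih cnt' queue'' removed' hinv_rn hinv_rk hinv_qn hinv_qm
        hcnt' hinv_q0 hinv_comp hinv_lt
      refine ⟨?_, IH2, ?_⟩
      · intro x hx
        exact IH1 x ((hmemr' x).mpr (Or.inl hx))
      · intro C hC hdis p hp
        have hnameC : ¬ C name := by
          intro hCn
          obtain ⟨_, pr, hpr, hCpr, hdep⟩ := hC name hCn
          have : 0 < pvCount P removed name :=
            (pv_count_pos_iff P removed name).mpr ⟨pr, hpr, hdis pr.1 hCpr, hdep⟩
          omega
        refine IH3 C hC (fun x hx hxr => ?_) p hp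
        rcases (hmemr' x).mp hxr with h | rfl
        · exact hdis x hx h
        · exact hnameC hx

lemma pv_SB_closed (P : List (String × List String)) (R : PySem.Set String)
    (hb1 : ∀ k ∈ pvKeys P, k ∉ R → ∃ pr ∈ P, pr.1 ∉ R ∧ k ∈ pr.2) :
    pvClosed P (fun p => p ∈ pvKeys P ∧ p ∉ R) := by
  rintro p ⟨hk, hr⟩
  refine ⟨hk, ?_⟩
  obtain ⟨pr, hpr, h1, h2⟩ := hb1 p hk hr
  exact ⟨pr, hpr, ⟨List.mem_map_of_mem hpr, h1⟩, h2⟩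

lemma pv_stable_case (P : List (String × List String)) (hK : (pvKeys P).Nodup)
    (R : PySem.Set String)
    (hb1 : ∀ k ∈ pvKeys P, k ∉ R → ∃ pr ∈ P, pr.1 ∉ R ∧ k ∈ pr.2)
    (hb2 : ∀ C, pvClosed P C → ∀ p, C p → p ∉ R)
    (pkgs : List (String × List String)) (hsub : pkgs.Sublist P)
    (hsurv : ∀ p, pvSurv P p → p ∈ pvKeys pkgs)
    (hdep : ∀ pr ∈ pkgs, pr.1 ∈ pvDepended pkgs) (hne : pkgs ≠ []) :
    (if (P.filter (fun pr => !(PySem.Set.contains R pr.1))).isEmpty then none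
     else some ((P.filter (fun pr => !(PySem.Set.contains R pr.1))).map Prod.fst))
    = some (pkgs.map Prod.fst) := by
  have hCk : pvClosed P (fun p => p ∈ pvKeys pkgs) := by
    intro p hp
    refine ⟨List.Sublist.subset (List.Sublist.map Prod.fst hsub) hp, ?_⟩
    obtain ⟨pr₀, hpr₀, hfst⟩ := List.mem_map.mp hp
    have hpd : p ∈ pvDepended pkgs := hfst ▸ hdep pr₀ hpr₀
    obtain ⟨pr, hpr, hmem⟩ := (pv_mem_depended pkgs p).mp hpd
    exact ⟨pr, hsub.subset hpr, List.mem_map_of_mem hpr, hmem⟩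
  have hfeq : P.filter (fun pr => !(PySem.Set.contains R pr.1)) = pkgs := by
    have hcongr : ∀ pr ∈ P,
        (!(PySem.Set.contains R pr.1)) = decide (pr.1 ∈ pvKeys pkgs) := by
      intro pr hpr
      rw [Bool.eq_iff_iff, decide_eq_true_eq, Bool.not_eq_true', ← Bool.not_eq_true,
        PySem.Set.contains_iff]
      constructor
      · intro hR
        exact hsurv pr.1 ⟨_, pv_SB_closed P R hb1, List.mem_map_of_mem hpr, hR⟩
      · intro hk
        exact hb2 _ hCk pr.1 hk
    rw [List.filter_congr hcongr]
    exact pv_filter_sublist_eq P pkgs hK hsub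
  rw [hfeq, if_neg (by simpa [List.isEmpty_iff] using hne)]

lemma pv_loopA_main (P : List (String × List String)) (hK : (pvKeys P).Nodup)
    (R : PySem.Set String)
    (hb1 : ∀ k ∈ pvKeys P, k ∉ R → ∃ pr ∈ P, pr.1 ∉ R ∧ k ∈ pr.2)
    (hb2 : ∀ C, pvClosed P C → ∀ p, C p → p ∉ R) :
    ∀ (fuel : Nat) (pkgs : List (String × List String)) (last : Option (PySem.Set String)),
    pkgs.Sublist P →
    (∀ p, pvSurv P p → p ∈ pvKeys pkgs) →
    (∀ d, last = some d → ∀ pr ∈ pkgs, pr.1 ∈ d) →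
    pkgs.length + 2 ≤ fuel →
    pvLoopA fuel last pkgs =
      (if (P.filter (fun pr => !(PySem.Set.contains R pr.1))).isEmpty then none
       else some ((P.filter (fun pr => !(PySem.Set.contains R pr.1))).map Prod.fst)) := by
  intro fuel
  induction fuel with
  | zero => intro pkgs last _ _ _ hfuel; omega
  | succ fuel ih =>
    intro pkgs last hsub hsurv hlast hfuel
    by_cases hemp : pkgs.isEmpty
    · rw [List.isEmpty_iff] at hemp
      subst hemp
      have hfe : P.filter (fun pr => !(PySem.Set.contains R pr.1)) = [] := by
        rw [List.filter_eq_nil_iff]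
        intro pr hpr hcon
        have hR : pr.1 ∉ R := by
          have : ¬ (PySem.Set.contains R pr.1 = true) := by simpa using hcon
          rwa [PySem.Set.contains_iff] at this
        have hs : pvSurv P pr.1 := ⟨_, pv_SB_closed P R hb1, List.mem_map_of_mem hpr, hR⟩
        simpa [pvKeys] using hsurv _ hs
      rw [pvLoopA, hfe]
      simp
    · have hne : pkgs ≠ [] := by simpa [List.isEmpty_iff] using hemp
      have hne' : 0 < pkgs.length := List.length_pos_of_ne_nil hne
      have hsub' : (pkgs.filter (fun pr => PySem.Set.contains (pvDepended pkgs) pr.1)).Sublist P :=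
        ((List.filter_sublist (l := pkgs))).trans hsub
      have hsurv' : ∀ p, pvSurv P p →
          p ∈ pvKeys (pkgs.filter (fun pr => PySem.Set.contains (pvDepended pkgs) pr.1)) := by
        intro p hp
        have hk : p ∈ pvKeys pkgs := hsurv p hp
        obtain ⟨pr₀, hpr₀, hfst⟩ := List.mem_map.mp hk
        have hpd : p ∈ pvDepended pkgs := by
          obtain ⟨C, hC, hCp⟩ := hp
          obtain ⟨_, pr, hpr, hCpr, hmem⟩ := hC p hCp
          have hprk : pr.1 ∈ pvKeys pkgs := hsurv pr.1 ⟨C, hC, hCpr⟩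
          have hprin : pr ∈ pkgs := pv_mem_of_sublist_key P pkgs hK hsub hpr hprk
          exact (pv_mem_depended pkgs p).mpr ⟨pr, hprin, hmem⟩
        refine List.mem_map.mpr ⟨pr₀, List.mem_filter.mpr ⟨hpr₀, ?_⟩, hfst⟩
        rw [PySem.Set.contains_iff, hfst]
        exact hpd
      have hlast' : ∀ d, (some (pvDepended pkgs) : Option (PySem.Set String)) = some d →
          ∀ pr ∈ pkgs.filter (fun pr => PySem.Set.contains (pvDepended pkgs) pr.1), pr.1 ∈ d := by
        intro d hd pr hpr
        cases Option.some.inj hd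
        have := (List.mem_filter.mp hpr).2
        rwa [PySem.Set.contains_iff] at this
      -- the recursive continuation, shared by the 'none' and unequal 'some' branches
      have hrec : pvLoopA fuel (some (pvDepended pkgs))
            (pkgs.filter (fun pr => PySem.Set.contains (pvDepended pkgs) pr.1))
          = (if (P.filter (fun pr => !(PySem.Set.contains R pr.1))).isEmpty then none
             else some ((P.filter (fun pr => !(PySem.Set.contains R pr.1))).map Prod.fst)) := by
        by_cases hlen : (pkgs.filter (fun pr => PySem.Set.contains (pvDepended pkgs) pr.1)).length
            < pkgs.length
        · exact ih _ _ hsub' hsurv' hlast' (by omega)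
        · have hfeq : pkgs.filter (fun pr => PySem.Set.contains (pvDepended pkgs) pr.1) = pkgs :=
            ((List.filter_sublist (l := pkgs))).eq_of_length
              (le_antisymm (List.Sublist.length_le ((List.filter_sublist (l := pkgs)))) (not_lt.mp hlen))
          have hdep : ∀ pr ∈ pkgs, pr.1 ∈ pvDepended pkgs := by
            intro pr hpr
            have := List.filter_eq_self.mp hfeq pr hpr
            rwa [PySem.Set.contains_iff] at this
          obtain ⟨f, rfl⟩ : ∃ f, fuel = f + 1 := ⟨fuel - 1, by omega⟩
          rw [hfeq, pvLoopA]
          rw [if_neg (by simpa [List.isEmpty_iff] using hne)]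
          have hdemp : (pvDepended pkgs).isEmpty = false := by
            obtain ⟨pr₀, hpr₀⟩ := List.exists_mem_of_ne_nil pkgs hne
            have := hdep pr₀ hpr₀
            rcases hd : pvDepended pkgs with _ | ⟨a, l⟩
            · rw [hd] at this; simp at this
            · rfl
          have heqd : PySem.Set.equal (pvDepended pkgs) (pvDepended pkgs) = true :=
            (PySem.Set.equal_iff _ _).mpr (fun x => Iff.rfl)
          simp only [hdemp, heqd, Bool.not_false, Bool.and_self, if_true]
          have hfeq2 : pkgs.filter (fun pr => PySem.Set.contains (pvDepended pkgs) pr.1) = pkgs :=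
            hfeq
          rw [hfeq2]
          exact (pv_stable_case P hK R hb1 hb2 pkgs hsub hsurv hdep hne).symm
      cases last with
      | none =>
        rw [pvLoopA, if_neg (by simpa using hemp)]
        exact hrec
      | some d =>
        rw [pvLoopA, if_neg (by simpa using hemp)]
        by_cases hfire : (!d.isEmpty && PySem.Set.equal d (pvDepended pkgs)) = true
        · simp only [hfire, if_true]
          have hd_eq : ∀ x, x ∈ d ↔ x ∈ pvDepended pkgs :=
            (PySem.Set.equal_iff d (pvDepended pkgs)).mp (Bool.and_elim_right hfire)
          have hdep : ∀ pr ∈ pkgs, pr.1 ∈ pvDepended pkgs := fun pr hpr =>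
            (hd_eq pr.1).mp (hlast d rfl pr hpr)
          have hfeq : pkgs.filter (fun pr => PySem.Set.contains (pvDepended pkgs) pr.1) = pkgs := by
            apply List.filter_eq_self.mpr
            intro pr hpr
            rw [PySem.Set.contains_iff]
            exact hdep pr hpr
          rw [hfeq]
          exact (pv_stable_case P hK R hb1 hb2 pkgs hsub hsurv hdep hne).symm
        · simp only [hfire, Bool.false_eq_true, if_false]
          exact hrec

-- ===== VERDICT (by name: the statement is the Claim_ definition above) =====
lemma pv_filterMap_if {α β : Type} (l : List α) (p : α → Bool) (f : α → β) :
    l.filterMap (fun x => if p x then some (f x) else none) = (l.filter p).map f := by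
  induction l with
  | nil => simp
  | cons a l ih => by_cases h : p a <;> simp [h, ih]

theorem reduce_cycle_set_spec : Claim_equal_reduce_cycle_set := by
  intro P _hdom hpre
  unfold Spec_reduce_cycle_set
  have hK : (pvKeys P).Nodup := hpre
  have hq0eq : pvQueue0 P
      = (P.filter (fun pr => (pvCnt0 P).getD pr.1 0 == 0)).map Prod.fst :=
    pv_filterMap_if P _ _
  have hempty : ∀ x : String, x ∉ (PySem.Set.empty : PySem.Set String) := by
    intro x h
    simp [PySem.Set.empty] at h
  have hrn : (PySem.Set.empty : PySem.Set String).Nodup := by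
    simp [PySem.Set.empty]
  have hqn : (pvQueue0 P).Nodup := by
    rw [hq0eq]
    exact List.Nodup.sublist (List.Sublist.map Prod.fst (List.filter_sublist (l := P))) hK
  have hqm : ∀ q ∈ pvQueue0 P, q ∈ pvKeys P ∧ q ∉ (PySem.Set.empty : PySem.Set String) := by
    intro q hq
    rw [hq0eq] at hq
    obtain ⟨pr, hpr, hfst⟩ := List.mem_map.mp hq
    have : pr ∈ P := (List.filter_sublist (l := P)).subset hpr
    exact ⟨hfst ▸ List.mem_map_of_mem this, hempty q⟩
  have hcnt : ∀ d, (pvCnt0 P).getD d 0 = ((pvCount P PySem.Set.empty d : Nat) : Int) :=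
    fun d => pv_cnt0_getD P d
  have hq0 : ∀ q ∈ pvQueue0 P, (pvCnt0 P).getD q 0 = 0 := by
    intro q hq
    rw [hq0eq] at hq
    obtain ⟨pr, hpr, hfst⟩ := List.mem_map.mp hq
    have := (List.mem_filter.mp hpr).2
    rw [beq_iff_eq] at this
    rw [← hfst]
    exact this
  have hcomp : ∀ k ∈ pvKeys P, k ∉ (PySem.Set.empty : PySem.Set String) →
      (pvCnt0 P).getD k 0 = 0 → k ∈ pvQueue0 P := by
    intro k hk _ hk0
    obtain ⟨pr, hpr, hfst⟩ := List.mem_map.mp hk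
    rw [hq0eq]
    refine List.mem_map.mpr ⟨pr, List.mem_filter.mpr ⟨hpr, ?_⟩, hfst⟩
    rw [beq_iff_eq, hfst]
    exact hk0
  have hlt : ((pvKeys P).filter
      (fun k => !(PySem.Set.contains (PySem.Set.empty : PySem.Set String) k))).length
      < P.length + 1 := by
    have : (pvKeys P).filter
        (fun k => !(PySem.Set.contains (PySem.Set.empty : PySem.Set String) k)) = pvKeys P := by
      apply List.filter_eq_self.mpr
      intro k _
      simp [PySem.Set.empty, PySem.Set.contains]
    rw [this]
    unfold pvKeys
    rw [List.length_map]
    omega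
  obtain ⟨_, KB2, KB3⟩ := pv_kahn_main P hK (P.length + 1) (pvCnt0 P) (pvQueue0 P)
    PySem.Set.empty hrn (fun x hx => absurd hx (hempty x)) hqn hqm hcnt hq0 hcomp hlt
  have hb2 : ∀ C, pvClosed P C → ∀ p, C p →
      p ∉ pvKahnB P (P.length + 1) (pvCnt0 P) (pvQueue0 P) PySem.Set.empty :=
    fun C hC => KB3 C hC (fun p _ h => absurd h (hempty p))
  have hA := pv_loopA_main P hK
    (pvKahnB P (P.length + 1) (pvCnt0 P) (pvQueue0 P) PySem.Set.empty) KB2 hb2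
    (P.length + 2) P none (List.Sublist.refl P)
    (fun p hp => by obtain ⟨C, hC, hCp⟩ := hp; exact (hC p hCp).1)
    (fun d hd => by cases hd) (le_refl _)
  exact hA
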